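-- pv_equiv track=rewrite | github.com/aqiyoung/Telegram-Log-Monitor | src/processors/alert_log_processor.py | _format_alerts
-- ===== SOURCE A (Python) =====
-- def _format_alerts(prioritized_alerts):
--     """
--     格式化告警为消息
--
--     Args:
--         prioritized_alerts: 按优先级分类的告警
--
--     Returns:
--         str: 格式化后的消息
--     """
--     if not any(prioritized_alerts.values()):
--         return "没有重要的系统告警日志"
--
--     # 构建格式化消息
--     message_parts = []
--     message_parts.append("🚨 **系统告警日志报告**")
--     message_parts.append("")
--
--     # 高优先级告警
--     if prioritized_alerts.get('high'):
--         message_parts.append("🔴 **高优先级**")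
--         for alert in prioritized_alerts['high']:
--             message_parts.append(f"- [{alert.get('service')}] {alert.get('level')}: {alert.get('message')[:100]}...")
--         message_parts.append("")
--
--     # 中优先级告警
--     if prioritized_alerts.get('medium'):
--         message_parts.append("🟡 **中优先级**")
--         for alert in prioritized_alerts['medium']:
--             message_parts.append(f"- [{alert.get('service')}] {alert.get('level')}: {alert.get('message')[:100]}...")
--         message_parts.append("")
--
--     # 低优先级告警
--     if prioritized_alerts.get('low'):
--         message_parts.append("🟢 **低优先级**")
--         for alert in prioritized_alerts['low']:
--             message_parts.append(f"- [{alert.get('service')}] {alert.get('level')}: {alert.get('message')[:100]}...")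
--         message_parts.append("")
--
--     return "\n".join(message_parts)
-- ===== SOURCE B (Python) =====
-- def _format_alerts(prioritized_alerts):
--     if not any(prioritized_alerts.values()):
--         return "没有重要的系统告警日志"
--
--     def lines(alerts):
--         # one "\n"-prefixed line per alert, built by recursion on the list
--         if not alerts:
--             return ""
--         a = alerts[0]
--         return (f"\n- [{a.get('service')}] {a.get('level')}: "
--                 f"{a.get('message')[:100]}...") + lines(alerts[1:])
--
--     def sections(table):
--         # recursively concatenate the non-empty priority sections
--         if not table:
--             return ""
--         (key, header) = table[0]
--         alerts = prioritized_alerts.get(key)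
--         body = "" if not alerts else "\n" + header + lines(alerts) + "\n"
--         return body + sections(table[1:])
--
--     return "🚨 **系统告警日志报告**\n" + sections(
--         [("high", "🔴 **高优先级**"),
--          ("medium", "🟡 **中优先级**"),
--          ("low", "🟢 **低优先级**")])
-- ===== Notes on version B (the rewrite author's own statement) =====
-- stated objective: alternative
-- what changed: A accumulates a list of message parts and finishes with '\n'.join; B never builds a list: two recursive helpers concatenate the result string directly, one recursing over the (key, header) priority table and one over each alert list, each emitting its piece with a leading newline.
-- outside the precondition, e.g. on _format_alerts({'high': [{'service': 'db', 'level': 'ERROR'}]}): A raises TypeError, B raises TypeError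
import Mathlib
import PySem

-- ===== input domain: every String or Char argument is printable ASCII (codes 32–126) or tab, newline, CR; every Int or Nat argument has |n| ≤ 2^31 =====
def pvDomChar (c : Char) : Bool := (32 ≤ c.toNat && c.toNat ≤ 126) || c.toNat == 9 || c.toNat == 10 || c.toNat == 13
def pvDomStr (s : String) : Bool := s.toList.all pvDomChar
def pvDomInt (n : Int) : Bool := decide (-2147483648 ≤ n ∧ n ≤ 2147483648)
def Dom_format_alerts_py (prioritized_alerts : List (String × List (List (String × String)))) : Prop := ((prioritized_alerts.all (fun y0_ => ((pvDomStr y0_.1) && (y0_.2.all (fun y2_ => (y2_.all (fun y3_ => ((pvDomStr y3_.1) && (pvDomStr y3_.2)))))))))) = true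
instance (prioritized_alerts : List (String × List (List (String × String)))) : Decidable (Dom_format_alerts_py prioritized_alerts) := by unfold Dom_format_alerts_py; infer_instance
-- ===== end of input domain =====

-- B replaces A's list-of-parts + "\n".join with direct recursive string construction (no intermediate list); objective: alternative.


-- shared dict helpers (assoc-list lookup = first match, Python dict.get)
def pvGetV (d : List (String × List (List (String × String)))) (k : String) :
    Option (List (List (String × String))) :=
  (d.find? (fun p => p.1 == k)).map (·.2)

def pvGetS (a : List (String × String)) (k : String) : Option String :=
  (a.find? (fun p => p.1 == k)).map (·.2)

-- f-string interpolation of a possibly-None value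
def pvShow (o : Option String) : String := o.getD "None"

-- ===== PORT A =====
-- the repeated f-string "- [{service}] {level}: {message[:100]}..." (message present by Pre_)
def pvLineA (a : List (String × String)) : String :=
  "- [" ++ pvShow (pvGetS a "service") ++ "] " ++ pvShow (pvGetS a "level") ++ ": " ++
    String.ofList (PySem.List.slice ((pvGetS a "message").getD "").toList none (some 100)) ++ "..."

def format_alerts_py (prioritized_alerts : List (String × List (List (String × String)))) : String :=
  if !(prioritized_alerts.any (fun p => !p.2.isEmpty)) then
    "没有重要的系统告警日志"
  else
    let parts : List String := ["🚨 **系统告警日志报告**", ""]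
    -- 高优先级告警
    let hv := (pvGetV prioritized_alerts "high").getD []
    let parts := if hv.isEmpty then parts else
      (hv.foldl (fun acc a => acc ++ [pvLineA a]) (parts ++ ["🔴 **高优先级**"])) ++ [""]
    -- 中优先级告警
    let mv := (pvGetV prioritized_alerts "medium").getD []
    let parts := if mv.isEmpty then parts else
      (mv.foldl (fun acc a => acc ++ [pvLineA a]) (parts ++ ["🟡 **中优先级**"])) ++ [""]
    -- 低优先级告警
    let lv := (pvGetV prioritized_alerts "low").getD []
    let parts := if lv.isEmpty then parts else
      (lv.foldl (fun acc a => acc ++ [pvLineA a]) (parts ++ ["🟢 **低优先级**"])) ++ [""]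
    PySem.Str.join "\n" parts

-- ===== PORT B =====
-- Source B's "\n"-prefixed per-alert line
def pvLineB (a : List (String × String)) : String :=
  "\n- [" ++ pvShow (pvGetS a "service") ++ "] " ++ pvShow (pvGetS a "level") ++ ": " ++
    String.ofList (PySem.List.slice ((pvGetS a "message").getD "").toList none (some 100)) ++ "..."

-- Source B's `lines`: recursion over the alert list, direct concatenation
def pvLines : List (List (String × String)) → String
  | [] => ""
  | a :: rest => pvLineB a ++ pvLines rest

-- Source B's `sections`: recursion over the (key, header) table
def pvSections (pa : List (String × List (List (String × String)))) :
    List (String × String) → String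
  | [] => ""
  | (key, header) :: rest =>
      let alerts := (pvGetV pa key).getD []
      (if alerts.isEmpty then "" else "\n" ++ header ++ pvLines alerts ++ "\n") ++
        pvSections pa rest

def format_alerts_py_alt (prioritized_alerts : List (String × List (List (String × String)))) : String :=
  if !(prioritized_alerts.any (fun p => !p.2.isEmpty)) then
    "没有重要的系统告警日志"
  else
    "🚨 **系统告警日志报告**\n" ++
      pvSections prioritized_alerts
        [("high", "🔴 **高优先级**"), ("medium", "🟡 **中优先级**"), ("low", "🟢 **低优先级**")]

-- ===== PRECONDITION & SPEC =====
-- Pre_ excludes inputs where some alert in a truthy high/medium/low list lacks a 'message'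
-- binding: there Python A raises TypeError (None[:100]) and returns no value (B raises too).
def Pre_format_alerts_py (prioritized_alerts : List (String × List (List (String × String)))) : Prop :=
  (["high", "medium", "low"].all (fun k =>
    ((pvGetV prioritized_alerts k).getD []).all (fun a => (pvGetS a "message").isSome))) = true
instance (prioritized_alerts : List (String × List (List (String × String)))) : Decidable (Pre_format_alerts_py prioritized_alerts) := by unfold Pre_format_alerts_py; infer_instance

def pvWitness_format_alerts_py : (List (String × List (List (String × String)))) :=
  [("high", [[("service", "db"), ("level", "ERROR"), ("message", "disk down")]]), ("low", [])]

def Spec_format_alerts_py (prioritized_alerts : List (String × List (List (String × String)))) (out : String) : Prop := out = format_alerts_py_alt prioritized_alerts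
instance (prioritized_alerts : List (String × List (List (String × String)))) (out : String) : Decidable (Spec_format_alerts_py prioritized_alerts out) := by unfold Spec_format_alerts_py; infer_instance

-- ===== CLAIM (what is proved, stated in full; the proofs are below) =====
def Claim_equal_format_alerts_py : Prop := ∀ (prioritized_alerts : List (String × List (List (String × String)))), Dom_format_alerts_py prioritized_alerts → Pre_format_alerts_py prioritized_alerts → Spec_format_alerts_py prioritized_alerts (format_alerts_py prioritized_alerts)

-- ===== LEMMAS AND PROOFS =====

-- glue: what "\n".join contributes for every part after the first
def pvGlue (l : List (List Char)) : List Char := (l.map (fun x => '\n' :: x)).flatten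

theorem join_eq_glue (x : List Char) :
    ∀ l : List (List Char), PySem.Chars.join ['\n'] (x :: l) = x ++ pvGlue l := by
  intro l
  induction l generalizing x with
  | nil => simp [PySem.Chars.join_singleton, pvGlue]
  | cons y r ih => simp [PySem.Chars.join_cons_cons, ih, pvGlue]

theorem foldl_push {α : Type} (f : α → String) :
    ∀ (l : List α) (acc : List String),
      l.foldl (fun acc a => acc ++ [f a]) acc = acc ++ l.map f := by
  intro l
  induction l with
  | nil => intro acc; simp
  | cons x xs ih => intro acc; simp [List.foldl, ih]

theorem lineB_toList (a : List (String × String)) :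
    (pvLineB a).toList = '\n' :: (pvLineA a).toList := by
  simp [pvLineA, pvLineB]

theorem lines_toList (l : List (List (String × String))) :
    (pvLines l).toList = pvGlue (l.map (fun a => (pvLineA a).toList)) := by
  induction l with
  | nil => simp [pvLines, pvGlue]
  | cons a r ih => simp [pvLines, lineB_toList, ih, pvGlue]

-- ===== VERDICT (by name: the statement is the Claim_ definition above) =====
theorem format_alerts_py_spec : Claim_equal_format_alerts_py := by
  intro pa _ _
  unfold Spec_format_alerts_py format_alerts_py format_alerts_py_alt
  by_cases h : (pa.any (fun p => !p.2.isEmpty)) = true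
  · rw [if_neg (by simp [h]), if_neg (by simp [h])]
    apply String.toList_inj.mp
    simp only [foldl_push]
    by_cases h1 : ((pvGetV pa "high").getD []).isEmpty <;>
      by_cases h2 : ((pvGetV pa "medium").getD []).isEmpty <;>
        by_cases h3 : ((pvGetV pa "low").getD []).isEmpty <;>
          simp [h1, h2, h3, pvSections, PySem.Str.toList_join, join_eq_glue,
                pvGlue, lines_toList, List.map_map, Function.comp_def]
  · simp [h]
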